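-- pv_equiv track=rewrite | github.com/gabekanegae/advent-of-code-2019 | 15_oxygen_system.py | findOxygen
-- ===== SOURCE A (Python) =====
-- from collections import deque
--
-- def findOxygen(maze, start, moves):
--     queue = deque([(start, 0)])
--     visited = set()
--     while queue:
--         cur, dist = queue.popleft()
--
--         if cur in visited: continue
--         visited.add(cur)
--
--         if maze[cur] == 2:
--             return (cur, dist)
--
--         for move in moves:
--             step = (cur[0]+move[0], cur[1]+move[1])
--             if maze[step] != 0:
--                 queue.append((step, dist+1))
-- ===== SOURCE B (Python) =====
-- def findOxygen(maze, start, moves):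
--     visited = set()
--     frontier = [start]
--     dist = 0
--     while frontier:
--         next_frontier = []
--         for cell in frontier:
--             if cell in visited: continue
--             visited.add(cell)
--             if maze[cell] == 2:
--                 return (cell, dist)
--             for move in moves:
--                 step = (cell[0]+move[0], cell[1]+move[1])
--                 if maze[step] != 0:
--                     next_frontier.append(step)
--         frontier = next_frontier
--         dist += 1
-- ===== Notes on version B (the rewrite author's own statement) =====
-- stated objective: alternative
-- what changed: Replaces the deque of (cell, dist) pairs by level-synchronous BFS: a per-level frontier list with a single integer dist counter advanced once per level, so no per-cell distance bookkeeping and no deque.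
import Mathlib
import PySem

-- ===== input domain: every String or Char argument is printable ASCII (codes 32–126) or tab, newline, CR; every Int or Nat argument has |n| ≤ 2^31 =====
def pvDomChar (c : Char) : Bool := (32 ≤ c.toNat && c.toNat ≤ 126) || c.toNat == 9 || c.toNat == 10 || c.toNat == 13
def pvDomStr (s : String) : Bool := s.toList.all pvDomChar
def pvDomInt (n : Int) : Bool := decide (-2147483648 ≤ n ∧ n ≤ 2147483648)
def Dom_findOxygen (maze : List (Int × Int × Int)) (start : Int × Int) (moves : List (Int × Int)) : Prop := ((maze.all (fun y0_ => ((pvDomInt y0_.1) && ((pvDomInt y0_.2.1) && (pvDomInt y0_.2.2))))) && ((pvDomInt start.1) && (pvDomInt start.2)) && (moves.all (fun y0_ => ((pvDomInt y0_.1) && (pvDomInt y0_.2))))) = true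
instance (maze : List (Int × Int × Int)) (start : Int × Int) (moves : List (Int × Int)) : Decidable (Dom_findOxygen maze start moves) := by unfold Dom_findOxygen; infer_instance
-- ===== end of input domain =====

-- B replaces A's deque of (cell, dist) pairs by level-synchronous BFS (frontier list per level,
-- one integer dist counter); equivalence of the RETURN value is proved on Pre_ below.

-- ===== PORT A =====
-- maze is a Python dict keyed by (x, y) pairs: a triple (x, y, v) is the entry (x, y) ↦ v, first match wins.
def mzGet? : List (Int × Int × Int) → Int × Int → Option Int
  | [], _ => none
  | (x, y, v) :: rest, c => if x = c.1 ∧ y = c.2 then some v else mzGet? rest c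

-- the inner 'for move in moves' loop: the valid neighbour steps of cur, none = KeyError on some step
def nbrs? (maze : List (Int × Int × Int)) (cur : Int × Int) : List (Int × Int) → Option (List (Int × Int))
  | [] => some []
  | m :: ms =>
    match mzGet? maze (cur.1 + m.1, cur.2 + m.2), nbrs? maze cur ms with
    | none, _ => none
    | some _, none => none
    | some v, some rest => some (if v ≠ 0 then (cur.1 + m.1, cur.2 + m.2) :: rest else rest)

-- termination helpers: the maze keys not yet visited
def mzKeys (maze : List (Int × Int × Int)) : Finset (Int × Int) :=
  (maze.map (fun t => (t.1, t.2.1))).toFinset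

def unvis (maze : List (Int × Int × Int)) (visited : List (Int × Int)) : Nat :=
  ((mzKeys maze).filter (fun c => c ∉ visited)).card

theorem mem_mzKeys_of_get? {maze : List (Int × Int × Int)} {c : Int × Int} {v : Int}
    (h : mzGet? maze c = some v) : c ∈ mzKeys maze := by
  induction maze with
  | nil => simp [mzGet?] at h
  | cons t rest ih =>
    obtain ⟨x, y, w⟩ := t
    simp only [mzGet?] at h
    by_cases hc : x = c.1 ∧ y = c.2
    · obtain ⟨c1, c2⟩ := c
      simp only [mzKeys, List.map_cons, List.mem_toFinset, List.mem_cons]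
      left
      simp at hc
      simp [hc.1, hc.2]
    · simp only [if_neg hc] at h
      have := ih h
      simp [mzKeys] at this ⊢
      exact .inr this

theorem unvis_add_lt {maze : List (Int × Int × Int)} {visited : PySem.Set (Int × Int)}
    {c : Int × Int} (hk : c ∈ mzKeys maze) (hv : c ∉ visited) :
    unvis maze (PySem.Set.add visited c) < unvis maze visited := by
  apply Finset.card_lt_card
  constructor
  · intro x hx
    simp only [Finset.mem_filter] at hx ⊢
    refine ⟨hx.1, fun hm => hx.2 ?_⟩
    rw [PySem.Set.mem_add]
    exact .inl hm
  · intro hsub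
    have hc : c ∈ (mzKeys maze).filter (fun x => x ∉ visited) := by
      simp only [Finset.mem_filter]
      exact ⟨hk, by simpa using hv⟩
    have := hsub hc
    simp only [Finset.mem_filter, PySem.Set.mem_add] at this
    exact this.2 (.inr trivial)

-- the while-loop of A: queue of (cell, dist), dedup on pop
def goA (maze : List (Int × Int × Int)) (moves : List (Int × Int))
    (visited : PySem.Set (Int × Int)) (queue : List ((Int × Int) × Int)) : (Int × Int) × Int :=
  match queue with
  | [] => ((0, 0), -1)      -- Python falls off the loop (None): outside Pre_
  | (cur, dist) :: rest =>
    if hmem : cur ∈ visited then goA maze moves visited rest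
    else
      match hget : mzGet? maze cur with
      | none => ((0, 0), -1)  -- KeyError: outside Pre_
      | some v =>
        if v = 2 then (cur, dist)
        else
          match nbrs? maze cur moves with
          | none => ((0, 0), -1)  -- KeyError on a step: outside Pre_
          | some st => goA maze moves (PySem.Set.add visited cur) (rest ++ st.map (fun s => (s, dist + 1)))
termination_by (unvis maze visited, queue.length)
decreasing_by
  · apply Prod.Lex.right
    simp
  · apply Prod.Lex.left
    exact unvis_add_lt (mem_mzKeys_of_get? hget) hmem

def findOxygen (maze : List (Int × Int × Int)) (start : Int × Int) (moves : List (Int × Int)) : (Int × Int) × Int :=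
  goA maze moves PySem.Set.empty [(start, 0)]

-- ===== PORT B =====
-- the 'for cell in frontier' loop of B: returns the answer, or (visited, next_frontier)
def goInner (maze : List (Int × Int × Int)) (moves : List (Int × Int))
    (visited : PySem.Set (Int × Int)) (frontier acc : List (Int × Int)) (dist : Int) :
    ((Int × Int) × Int) ⊕ (PySem.Set (Int × Int) × List (Int × Int)) :=
  match frontier with
  | [] => .inr (visited, acc)
  | c :: cs =>
    if c ∈ visited then goInner maze moves visited cs acc dist
    else
      match mzGet? maze c with
      | none => .inl ((0, 0), -1)  -- KeyError: outside Pre_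
      | some v =>
        if v = 2 then .inl (c, dist)
        else
          match nbrs? maze c moves with
          | none => .inl ((0, 0), -1)  -- KeyError on a step: outside Pre_
          | some st => goInner maze moves (PySem.Set.add visited c) cs (acc ++ st) dist

theorem goInner_step {maze : List (Int × Int × Int)} {moves : List (Int × Int)} :
    ∀ {frontier : List (Int × Int)} {visited : PySem.Set (Int × Int)} {acc : List (Int × Int)}
      {dist : Int} {v' : PySem.Set (Int × Int)} {next : List (Int × Int)},
      goInner maze moves visited frontier acc dist = .inr (v', next) →
      unvis maze v' < unvis maze visited ∨ (v' = visited ∧ next = acc) := by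
  intro frontier
  induction frontier with
  | nil =>
    intro visited acc dist v' next h
    simp [goInner] at h
    exact .inr ⟨h.1.symm, h.2.symm⟩
  | cons c cs ih =>
    intro visited acc dist v' next h
    simp only [goInner] at h
    by_cases hmem : c ∈ visited
    · simp only [if_pos hmem] at h
      exact ih h
    · simp only [if_neg hmem] at h
      rcases hg : mzGet? maze c with _ | v <;> rw [hg] at h
      · simp at h
      · by_cases hv : v = 2
        · simp [hv] at h
        · simp only [if_neg hv] at h
          rcases hn : nbrs? maze c moves with _ | st <;> rw [hn] at h
          · simp at h
          · left
            have hlt := unvis_add_lt (mem_mzKeys_of_get? hg) hmem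
            rcases ih h with h' | ⟨rfl, _⟩
            · exact lt_trans h' hlt
            · exact hlt

-- the 'while frontier' loop of B
def goOuter (maze : List (Int × Int × Int)) (moves : List (Int × Int))
    (visited : PySem.Set (Int × Int)) (frontier : List (Int × Int)) (dist : Int) : (Int × Int) × Int :=
  match frontier with
  | [] => ((0, 0), -1)      -- Python falls off the loop (None): outside Pre_
  | _ :: _ =>
    match h : goInner maze moves visited frontier [] dist with
    | .inl a => a
    | .inr (v', next) => goOuter maze moves v' next (dist + 1)
termination_by (unvis maze visited, frontier.length)
decreasing_by
  rcases goInner_step h with hlt | ⟨rfl, rfl⟩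
  · exact Prod.Lex.left _ _ hlt
  · apply Prod.Lex.right
    simp

def findOxygen_alt (maze : List (Int × Int × Int)) (start : Int × Int) (moves : List (Int × Int)) : (Int × Int) × Int :=
  goOuter maze moves PySem.Set.empty [start] 0

-- ===== PRECONDITION & SPEC =====
-- spec-side value lookup (library find?: first matching key) used only to state Pre_
def mzVal? (maze : List (Int × Int × Int)) (c : Int × Int) : Option Int :=
  (maze.find? (fun t => t.1 == c.1 && t.2.1 == c.2)).map (fun t => t.2.2)

-- a cell whose expansion would raise KeyError: some neighbour key is missing from the maze
def cellBad (maze : List (Int × Int × Int)) (moves : List (Int × Int)) (c : Int × Int) : Bool :=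
  moves.any (fun m => (mzVal? maze (c.1 + m.1, c.2 + m.2)).isNone)

-- one BFS level of the spec-side fixpoint: state (status, seen, frontier) with status
-- 0 = running, 1 = A returns, 2 = A raises KeyError or falls off the loop (None).
-- This is a declarative bounded fixpoint over levels stating WHICH terminal event comes first;
-- it carries no queue and no distances and is not either port's recursion.
def levelStep (maze : List (Int × Int × Int)) (moves : List (Int × Int)) :
    Nat × List (Int × Int) × List (Int × Int) → Nat × List (Int × Int) × List (Int × Int)
  | (st, seen, frontier) =>
    if st ≠ 0 then (st, seen, frontier)
    else
      let fr := frontier.foldl (fun acc c => if c ∈ seen ∨ c ∈ acc then acc else acc ++ [c]) []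
      match fr.find? (fun c => mzVal? maze c == some 2 || cellBad maze moves c) with
      | some c => (if mzVal? maze c == some 2 then 1 else 2, seen, [])
      | none =>
        if fr.isEmpty then (2, seen, [])
        else (0, seen ++ fr,
              fr.flatMap (fun c =>
                (moves.map (fun m => (c.1 + m.1, c.2 + m.2))).filter
                  (fun s => (mzVal? maze s).getD 0 ≠ 0)))

-- Pre_ holds EXACTLY on the inputs where the Python A returns a value: the start key is present and,
-- level by level, the first oxygen cell is met before any cell whose neighbour key is missing
-- (A raises KeyError there) and before the frontier empties (A falls off the loop returning None).
def Pre_findOxygen (maze : List (Int × Int × Int)) (start : Int × Int) (moves : List (Int × Int)) : Prop :=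
  start ∈ maze.map (fun t => (t.1, t.2.1)) ∧
  ((levelStep maze moves)^[maze.length + 2] (0, [], [start])).1 = 1

instance (maze : List (Int × Int × Int)) (start : Int × Int) (moves : List (Int × Int)) : Decidable (Pre_findOxygen maze start moves) := by unfold Pre_findOxygen; infer_instance

def pvWitness_findOxygen : (List (Int × Int × Int)) × (Int × Int) × (List (Int × Int)) :=
  ([(0, 0, 1), (1, 0, 2)], (0, 0), [(1, 0)])

def Spec_findOxygen (maze : List (Int × Int × Int)) (start : Int × Int) (moves : List (Int × Int)) (out : (Int × Int) × Int) : Prop := out = findOxygen_alt maze start moves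
instance (maze : List (Int × Int × Int)) (start : Int × Int) (moves : List (Int × Int)) (out : (Int × Int) × Int) : Decidable (Spec_findOxygen maze start moves out) := by unfold Spec_findOxygen; infer_instance

-- ===== CLAIM (what is proved, stated in full; the proofs are below) =====
def Claim_equal_findOxygen : Prop := ∀ (maze : List (Int × Int × Int)) (start : Int × Int) (moves : List (Int × Int)), Dom_findOxygen maze start moves → Pre_findOxygen maze start moves → Spec_findOxygen maze start moves (findOxygen maze start moves)

-- ===== LEMMAS AND PROOFS =====

theorem goA_nil (maze : List (Int × Int × Int)) (moves : List (Int × Int)) (visited : PySem.Set (Int × Int)) :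
    goA maze moves visited [] = ((0, 0), -1) := by
  rw [goA.eq_def]

theorem goA_cons (maze : List (Int × Int × Int)) (moves : List (Int × Int)) (visited : PySem.Set (Int × Int))
    (cur : Int × Int) (dist : Int) (rest : List ((Int × Int) × Int)) :
    goA maze moves visited ((cur, dist) :: rest) =
      if cur ∈ visited then goA maze moves visited rest
      else
        match mzGet? maze cur with
        | none => ((0, 0), -1)
        | some v =>
          if v = 2 then (cur, dist)
          else
            match nbrs? maze cur moves with
            | none => ((0, 0), -1)
            | some st => goA maze moves (PySem.Set.add visited cur) (rest ++ st.map (fun s => (s, dist + 1))) := by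
  rw [goA.eq_def]
  by_cases hm : cur ∈ visited
  · simp [hm]
  · simp only [dif_neg hm, if_neg hm]
    split <;> rename_i heq <;> rw [heq]

theorem goOuter_nil (maze : List (Int × Int × Int)) (moves : List (Int × Int)) (visited : PySem.Set (Int × Int)) (dist : Int) :
    goOuter maze moves visited [] dist = ((0, 0), -1) := by
  rw [goOuter.eq_def]

theorem goOuter_cons (maze : List (Int × Int × Int)) (moves : List (Int × Int)) (visited : PySem.Set (Int × Int))
    (c : Int × Int) (cs : List (Int × Int)) (dist : Int) :
    goOuter maze moves visited (c :: cs) dist =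
      (match goInner maze moves visited (c :: cs) [] dist with
       | .inl a => a
       | .inr (v', next) => goOuter maze moves v' next (dist + 1)) := by
  rw [goOuter.eq_def]
  split
  · rename_i heq
    simp at heq
  · rename_i x m ms heq
    obtain ⟨rfl, rfl⟩ : c = m ∧ cs = ms := by injection heq with h1 h2; exact ⟨h1, h2⟩
    split <;> rename_i h2 <;> rw [h2]

theorem nbrs?_length_le {maze : List (Int × Int × Int)} {cur : Int × Int}
    {moves st : List (Int × Int)} (h : nbrs? maze cur moves = some st) :
    st.length ≤ moves.length := by
  induction moves generalizing st with
  | nil => simp [nbrs?] at h; simp [← h]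
  | cons m ms ih =>
    simp only [nbrs?] at h
    rcases hg : mzGet? maze (cur.1 + m.1, cur.2 + m.2) with _ | v <;> rw [hg] at h
    · simp at h
    · rcases hr : nbrs? maze cur ms with _ | rest <;> rw [hr] at h
      · simp at h
      · have hle := ih hr
        rcases h with ⟨rfl⟩ | _
        by_cases hv : v ≠ 0 <;> simp [hv, List.length] <;> omega

-- A's queue is always (rest of current level at dist d) ++ (next level at dist d+1); processing it
-- with goA equals B's inner loop over the current level followed by B's outer loop on the next level.
theorem bfs_levels (maze : List (Int × Int × Int)) (moves : List (Int × Int)) :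
    ∀ (n : Nat) (visited : PySem.Set (Int × Int)) (l1 l2 : List (Int × Int)) (d : Int),
      unvis maze visited * (2 * moves.length + 2) + l1.length + 2 * l2.length ≤ n →
      goA maze moves visited (l1.map (fun c => (c, d)) ++ l2.map (fun c => (c, d + 1)))
        = (match goInner maze moves visited l1 l2 d with
           | .inl a => a
           | .inr (v', next) => if next.isEmpty then ((0, 0), -1) else goOuter maze moves v' next (d + 1)) := by
  intro n
  induction n with
  | zero =>
    intro visited l1 l2 d hb
    have hl1 : l1 = [] := List.eq_nil_of_length_eq_zero (by omega)
    have hl2 : l2 = [] := List.eq_nil_of_length_eq_zero (by omega)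
    subst hl1; subst hl2
    simp [goInner, goA_nil]
  | succ n ih =>
    intro visited l1 l2 d hb
    cases l1 with
    | nil =>
      cases l2 with
      | nil => simp [goInner, goA_nil]
      | cons c cs =>
        have hih := ih visited (c :: cs) [] (d + 1)
          (by simp only [List.length_cons, List.length_nil] at hb ⊢; omega)
        simp only [List.map_nil, List.append_nil] at hih
        simp only [List.map_nil, List.nil_append, goInner, List.isEmpty_cons, Bool.false_eq_true, ite_false]
        rw [goOuter_cons, hih]
        rcases hgi : goInner maze moves visited (c :: cs) [] (d + 1) with a | ⟨v', next⟩
        · rfl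
        · cases next with
          | nil => simp [goOuter_nil]
          | cons a b => simp
    | cons c cs =>
      simp only [List.map_cons, List.cons_append, goA_cons, goInner]
      by_cases hm : c ∈ visited
      · simp only [if_pos hm]
        exact ih visited cs l2 d (by simp only [List.length_cons] at hb ⊢; omega)
      · simp only [if_neg hm]
        rcases hg : mzGet? maze c with _ | v
        · rfl
        · by_cases hv : v = 2
          · simp [hv]
          · simp only [if_neg hv]
            rcases hn : nbrs? maze c moves with _ | st
            · rfl
            · simp only []
              have harr : (cs.map (fun c => (c, d)) ++ l2.map (fun c => (c, d + 1)))
                    ++ st.map (fun s => (s, d + 1))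
                  = cs.map (fun c => (c, d)) ++ (l2 ++ st).map (fun c => (c, d + 1)) := by
                simp [List.append_assoc]
              rw [harr]
              apply ih
              have hst := nbrs?_length_le hn
              have hlt := unvis_add_lt (mem_mzKeys_of_get? hg) hm
              have hmul : unvis maze (PySem.Set.add visited c) * (2 * moves.length + 2)
                    + (2 * moves.length + 2) ≤ unvis maze visited * (2 * moves.length + 2) := by
                calc unvis maze (PySem.Set.add visited c) * (2 * moves.length + 2) + (2 * moves.length + 2)
                    = (unvis maze (PySem.Set.add visited c) + 1) * (2 * moves.length + 2) := by ring
                  _ ≤ unvis maze visited * (2 * moves.length + 2) :=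
                      Nat.mul_le_mul_right _ hlt
              simp only [List.length_cons, List.length_append] at hb ⊢
              omega

theorem port_eq (maze : List (Int × Int × Int)) (start : Int × Int) (moves : List (Int × Int)) :
    findOxygen maze start moves = findOxygen_alt maze start moves := by
  unfold findOxygen findOxygen_alt
  have h := bfs_levels maze moves
    (unvis maze PySem.Set.empty * (2 * moves.length + 2) + 1) PySem.Set.empty [start] [] 0
    (by simp)
  simp only [List.map_cons, List.map_nil, List.append_nil] at h
  rw [h, goOuter_cons]
  rcases hgi : goInner maze moves PySem.Set.empty [start] [] 0 with a | ⟨v', next⟩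
  · rfl
  · cases next with
    | nil => simp [goOuter_nil]
    | cons a b => simp

-- ===== VERDICT (by name: the statement is the Claim_ definition above) =====
theorem findOxygen_spec : Claim_equal_findOxygen := by
  intro maze start moves _ _
  unfold Spec_findOxygen
  exact port_eq maze start moves
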